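-- pv_equiv track=rewrite | github.com/callmeliuchu/gomoku-ai-code | ppo_9x9_5/gomoku_ppo.py | inverse_transform_coords
-- ===== SOURCE A (Python) =====
-- def inverse_transform_coords(
--     row: int,
--     col: int,
--     board_size: int,
--     rotation_k: int,
--     flip: bool,
-- ) -> tuple[int, int]:
--     if flip:
--         col = board_size - 1 - col
--     for _ in range(rotation_k % 4):
--         row, col = col, board_size - 1 - row
--     return row, col
-- ===== SOURCE B (Python) =====
-- def inverse_transform_coords(
--     row: int,
--     col: int,
--     board_size: int,
--     rotation_k: int,
--     flip: bool,
-- ) -> tuple[int, int]: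
--     if flip:
--         col = board_size - 1 - col
--     k = rotation_k % 4
--     if k == 0:
--         return row, col
--     if k == 1:
--         return col, board_size - 1 - row
--     if k == 2:
--         return board_size - 1 - row, board_size - 1 - col
--     return board_size - 1 - col, row
-- ===== Notes on version B (the rewrite author's own statement) =====
-- stated objective: simpler
-- what changed: Replaces the rotation loop with a closed-form case split on rotation_k % 4 that returns the final coordinates directly.
import Mathlib
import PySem

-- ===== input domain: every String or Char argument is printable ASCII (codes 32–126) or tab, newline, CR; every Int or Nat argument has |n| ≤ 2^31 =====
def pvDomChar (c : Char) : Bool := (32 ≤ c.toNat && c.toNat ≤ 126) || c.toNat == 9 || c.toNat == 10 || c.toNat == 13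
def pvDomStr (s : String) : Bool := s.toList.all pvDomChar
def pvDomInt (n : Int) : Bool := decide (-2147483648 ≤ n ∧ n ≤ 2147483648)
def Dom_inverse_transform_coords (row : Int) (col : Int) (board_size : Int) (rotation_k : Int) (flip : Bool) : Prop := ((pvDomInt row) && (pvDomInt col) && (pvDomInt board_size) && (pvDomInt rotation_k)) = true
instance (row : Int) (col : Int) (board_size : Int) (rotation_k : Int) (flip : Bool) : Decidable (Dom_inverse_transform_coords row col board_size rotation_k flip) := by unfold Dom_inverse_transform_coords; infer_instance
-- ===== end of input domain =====

-- B computes the inverse rotation in closed form (case split on rotation_k % 4) instead of looping; simpler, same behaviour.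
-- ===== PORT A =====
-- faithful port of A: flip, then fold the swap step over range(rotation_k % 4)
def inverse_transform_coords (row : Int) (col : Int) (board_size : Int) (rotation_k : Int) (flip : Bool) : Int × Int :=
  let col := if flip then board_size - 1 - col else col
  (PySem.List.pyRange 0 (PySem.Int.mod rotation_k 4) 1).foldl
    (fun (rc : Int × Int) _ => (rc.2, board_size - 1 - rc.1)) (row, col)

-- ===== PORT B =====
-- port of B: closed-form case split on rotation_k % 4
def inverse_transform_coords_alt (row : Int) (col : Int) (board_size : Int) (rotation_k : Int) (flip : Bool) : Int × Int :=
  let col := if flip then board_size - 1 - col else col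
  let k := PySem.Int.mod rotation_k 4
  if k = 0 then (row, col)
  else if k = 1 then (col, board_size - 1 - row)
  else if k = 2 then (board_size - 1 - row, board_size - 1 - col)
  else (board_size - 1 - col, row)

-- ===== PRECONDITION & SPEC =====
def Spec_inverse_transform_coords (row : Int) (col : Int) (board_size : Int) (rotation_k : Int) (flip : Bool) (out : Int × Int) : Prop := out = inverse_transform_coords_alt row col board_size rotation_k flip
instance (row : Int) (col : Int) (board_size : Int) (rotation_k : Int) (flip : Bool) (out : Int × Int) : Decidable (Spec_inverse_transform_coords row col board_size rotation_k flip out) := by unfold Spec_inverse_transform_coords; infer_instance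

-- ===== CLAIM (what is proved, stated in full; the proofs are below) =====
def Claim_equal_inverse_transform_coords : Prop := ∀ (row : Int) (col : Int) (board_size : Int) (rotation_k : Int) (flip : Bool), Dom_inverse_transform_coords row col board_size rotation_k flip → Spec_inverse_transform_coords row col board_size rotation_k flip (inverse_transform_coords row col board_size rotation_k flip)

-- ===== LEMMAS AND PROOFS =====

-- ===== VERDICT (by name: the statement is the Claim_ definition above) =====
lemma pv_mod4_cases (n : Int) : PySem.Int.mod n 4 = 0 ∨ PySem.Int.mod n 4 = 1 ∨
    PySem.Int.mod n 4 = 2 ∨ PySem.Int.mod n 4 = 3 := by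
  have h0 := PySem.Int.mod_nonneg n (b := 4) (by norm_num)
  have h1 := PySem.Int.mod_lt n (b := 4) (by norm_num)
  omega

lemma pv_range0 : PySem.List.pyRange 0 0 1 = [] := by decide
lemma pv_range1 : PySem.List.pyRange 0 1 1 = [0] := by decide
lemma pv_range2 : PySem.List.pyRange 0 2 1 = [0, 1] := by decide
lemma pv_range3 : PySem.List.pyRange 0 3 1 = [0, 1, 2] := by decide

theorem inverse_transform_coords_spec : Claim_equal_inverse_transform_coords := by
  intro row col board_size rotation_k flip _
  unfold Spec_inverse_transform_coords inverse_transform_coords inverse_transform_coords_alt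
  rcases pv_mod4_cases rotation_k with h | h | h | h <;>
    simp only [h, pv_range0, pv_range1, pv_range2, pv_range3,
      List.foldl_cons, List.foldl_nil] <;> norm_num
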